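-- pv_equiv track=rewrite | github.com/3x-haust/CodingTest | 프로그래머스/5/68938. 문자열의 아름다움/문자열의 아름다움.py | solution
-- ===== SOURCE A (Python) =====
-- import collections
-- import itertools
--
-- def solution(s):
--     count_by_len_by_ch = collections.defaultdict(
--         lambda: collections.defaultdict(int))
--     for ch, group in itertools.groupby(s):
--         count_by_len_by_ch[ch][len(list(group))] += 1
--
--     answer = (len(s) - 1) * len(s) * (len(s) + 1) // 6
--     for count_by_len in count_by_len_by_ch.values():
--         t = sum(count_by_len.values())
--         s = sum(l * count for l, count in count_by_len.items())
--         for l in range(1, max(count_by_len) + 1):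
--             answer -= s * (s - 1) // 2
--             s -= t
--             t -= count_by_len[l]
--     return answer
-- ===== SOURCE B (Python) =====
-- import collections
-- import itertools
--
--
-- def solution(s):
--     # Per character, collect the list of consecutive-run lengths; then for each
--     # depth d recompute s_d by scanning that list instead of maintaining
--     # running totals over a length->count dict.
--     runs_by_ch = collections.defaultdict(list)
--     for ch, group in itertools.groupby(s):
--         runs_by_ch[ch].append(len(list(group)))
--
--     answer = (len(s) - 1) * len(s) * (len(s) + 1) // 6
--     for runs in runs_by_ch.values():
--         for d in range(max(runs)):
--             sd = sum(max(r - d, 0) for r in runs)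
--             answer -= sd * (sd - 1) // 2
--     return answer
-- ===== Notes on version B (the rewrite author's own statement) =====
-- stated objective: simpler
-- what changed: B stores each character's consecutive-run lengths as a plain list and, for every depth d, recomputes s_d by rescanning that list with sum(max(r-d,0)), replacing A's length->count dicts and its incrementally decremented (s, t) running totals.
import Mathlib
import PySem

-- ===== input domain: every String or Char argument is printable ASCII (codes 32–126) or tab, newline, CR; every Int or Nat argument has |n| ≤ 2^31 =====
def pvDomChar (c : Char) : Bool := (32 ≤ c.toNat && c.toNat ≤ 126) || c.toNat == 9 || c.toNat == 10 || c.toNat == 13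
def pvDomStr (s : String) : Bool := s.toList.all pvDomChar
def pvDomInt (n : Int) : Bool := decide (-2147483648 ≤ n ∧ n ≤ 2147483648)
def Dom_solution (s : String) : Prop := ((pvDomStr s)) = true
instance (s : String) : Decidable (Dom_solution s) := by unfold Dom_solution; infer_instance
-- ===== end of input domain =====

-- B replaces A's incrementally maintained (s, t) running totals over a length->count dict by
-- per-character run-length lists that are rescanned at each depth (objective: simpler).

-- shared helper: itertools.groupby(s) with run lengths, [(ch, len(list(group))), ...]
def pvRunsAux (c : Char) (k : Int) : List Char → List (Char × Int)
  | [] => [(c, k)]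
  | d :: rest => if d = c then pvRunsAux c (k + 1) rest else (c, k) :: pvRunsAux d 1 rest

def pvRuns : List Char → List (Char × Int)
  | [] => []
  | c :: rest => pvRunsAux c 1 rest

-- ===== PORT A =====
def solution (s : String) : Int :=
  let runs := pvRuns s.toList
  -- count_by_len_by_ch[ch][len] += 1 on a defaultdict(lambda: defaultdict(int))
  let cbc : PySem.Dict Char (PySem.Dict Int Int) :=
    runs.foldl
      (fun d p => d.modify p.1 PySem.Dict.empty (fun inner => inner.modify p.2 0 (· + 1)))
      PySem.Dict.empty
  let n : Int := PySem.Str.len s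
  let answer := PySem.Int.floordiv ((n - 1) * n * (n + 1)) 6
  cbc.values.foldl
    (fun answer cbl =>
      let t := cbl.values.sum
      let sv := (cbl.items.map (fun p => p.1 * p.2)).sum
      -- max(count_by_len): the inner dict is never empty, so Python's max returns; `.getD 0` is unreachable
      let m := (PySem.List.max? cbl.keys (fun x => x)).getD 0
      ((PySem.List.pyRange 1 (m + 1) 1).foldl
        (fun st l =>
          (st.1 - PySem.Int.floordiv (st.2.1 * (st.2.1 - 1)) 2,
           st.2.1 - st.2.2,
           st.2.2 - cbl.getD l 0))
        (answer, sv, t)).1)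
    answer

-- ===== PORT B =====
def solution_alt (s : String) : Int :=
  let runs := pvRuns s.toList
  -- runs_by_ch[ch].append(len(list(group))) on a defaultdict(list)
  let rbc : PySem.Dict Char (List Int) :=
    runs.foldl (fun d p => d.modify p.1 [] (· ++ [p.2])) PySem.Dict.empty
  let n : Int := PySem.Str.len s
  let answer := PySem.Int.floordiv ((n - 1) * n * (n + 1)) 6
  rbc.values.foldl
    (fun answer rs =>
      -- max(runs): rs is never empty, so Python's max returns; `.getD 0` is unreachable
      (PySem.List.pyRange 0 ((PySem.List.max? rs (fun x => x)).getD 0) 1).foldl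
        (fun ans d =>
          let sd := (rs.map (fun r => max (r - d) 0)).sum
          ans - PySem.Int.floordiv (sd * (sd - 1)) 2)
        answer)
    answer

-- ===== PRECONDITION & SPEC =====
def Spec_solution (s : String) (out : Int) : Prop := out = solution_alt s
instance (s : String) (out : Int) : Decidable (Spec_solution s out) := by unfold Spec_solution; infer_instance

-- ===== CLAIM (what is proved, stated in full; the proofs are below) =====
def Claim_equal_solution : Prop := ∀ (s : String), Dom_solution s → Spec_solution s (solution s)

-- ===== LEMMAS AND PROOFS =====

-- s_d of a run list: sum of max(r - d, 0)
def pvS (ls : List Int) (d : Int) : Int := (ls.map (fun r => max (r - d) 0)).sum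
-- t_d of a run list: number of runs longer than d
def pvT (ls : List Int) (d : Int) : Int := ((ls.filter (fun r => decide (d < r))).length : Int)

lemma pvS_cons (a : Int) (ls : List Int) (d : Int) :
    pvS (a :: ls) d = max (a - d) 0 + pvS ls d := by
  simp [pvS]

lemma pvT_cons (a : Int) (ls : List Int) (d : Int) :
    pvT (a :: ls) d = (if d < a then 1 else 0) + pvT ls d := by
  simp only [pvT, List.filter_cons]
  by_cases h : d < a
  · simp [h]
    ring
  · simp [h]

lemma pvS_succ (ls : List Int) (d : Int) : pvS ls (d + 1) = pvS ls d - pvT ls d := by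
  induction ls with
  | nil => simp [pvS, pvT]
  | cons a ls ih =>
    rw [pvS_cons, pvS_cons, pvT_cons, ih]
    by_cases h : d < a
    · rw [max_eq_left (by omega), max_eq_left (by omega), if_pos h]
      ring
    · rw [max_eq_right (by omega), max_eq_right (by omega), if_neg h]
      ring

lemma pvT_succ (ls : List Int) (d : Int) :
    pvT ls (d + 1) = pvT ls d - (ls.count (d + 1) : Int) := by
  induction ls with
  | nil => simp [pvT]
  | cons a ls ih =>
    rw [pvT_cons, pvT_cons, ih, List.count_cons]
    simp only [beq_iff_eq]
    push_cast
    split_ifs <;> omega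

lemma pvS_zero (ls : List Int) (h : ∀ r ∈ ls, 1 ≤ r) : pvS ls 0 = ls.sum := by
  induction ls with
  | nil => simp [pvS]
  | cons a ls ih =>
    have ha := h a (by simp)
    rw [pvS_cons, List.sum_cons, ih (fun r hr => h r (by simp [hr])),
      max_eq_left (by omega)]
    ring

lemma pvT_zero (ls : List Int) (h : ∀ r ∈ ls, 1 ≤ r) : pvT ls 0 = (ls.length : Int) := by
  induction ls with
  | nil => simp [pvT]
  | cons a ls ih =>
    have ha := h a (by simp)
    rw [pvT_cons, if_pos (by omega), ih (fun r hr => h r (by simp [hr]))]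
    simp
    ring

-- the core loop correspondence: A's decremented (answer, s, t) state vs B's rescans
lemma pv_core (ls : List Int) (m d ans : Int) :
    ((PySem.List.pyRange (d + 1) (m + 1) 1).foldl
      (fun st l =>
        (st.1 - PySem.Int.floordiv (st.2.1 * (st.2.1 - 1)) 2,
         st.2.1 - st.2.2,
         st.2.2 - (PySem.Dict.counter ls).getD l 0))
      (ans, pvS ls d, pvT ls d)).1
    = (PySem.List.pyRange d m 1).foldl
      (fun ans d =>
        let sd := (ls.map (fun r => max (r - d) 0)).sum
        ans - PySem.Int.floordiv (sd * (sd - 1)) 2)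
      ans := by
  induction h : (m - d).toNat generalizing d ans with
  | zero =>
    rw [PySem.List.pyRange_one_eq_nil (by omega), PySem.List.pyRange_one_eq_nil (by omega)]
    rfl
  | succ n ih =>
    rw [PySem.List.pyRange_one_cons (show d + 1 < m + 1 by omega),
      PySem.List.pyRange_one_cons (show d < m by omega)]
    simp only [List.foldl_cons]
    rw [PySem.Dict.getD_counter, ← pvT_succ, ← pvS_succ]
    exact ih (d + 1) (ans - PySem.Int.floordiv (pvS ls d * (pvS ls d - 1)) 2) (by omega)

-- picking one element out of a Nodup list by an indicator sum
lemma pv_sum_pick (K : List Int) (a : Int) (f : Int → Int) (hnd : K.Nodup) (ha : a ∈ K) :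
    (K.map (fun k => if k = a then f k else 0)).sum = f a := by
  induction K with
  | nil => simp at ha
  | cons b K ih =>
    simp only [List.map_cons, List.sum_cons]
    rcases List.mem_cons.mp ha with h | h
    · subst h
      have hz : (K.map (fun k => if k = a then f k else 0)).sum = 0 := by
        apply List.sum_eq_zero
        intro x hx
        simp only [List.mem_map] at hx
        obtain ⟨k, hk, rfl⟩ := hx
        have hne : k ≠ a := fun e => (List.nodup_cons.mp hnd).1 (e ▸ hk)
        simp [hne]
      rw [hz, if_pos rfl, add_zero]
    · have hb : b ≠ a := fun e => (List.nodup_cons.mp hnd).1 (e ▸ h)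
      rw [ih (List.nodup_cons.mp hnd).2 h]
      simp [hb]

lemma pv_sum_count (K ls : List Int) (hnd : K.Nodup) (hmem : ∀ x ∈ ls, x ∈ K) :
    (K.map (fun k => (ls.count k : Int))).sum = (ls.length : Int) := by
  induction ls with
  | nil => simp
  | cons a ls ih =>
    have h1 : ∀ k ∈ K, ((a :: ls).count k : Int) = (ls.count k : Int) + (if k = a then 1 else 0) := by
      intro k _
      rw [List.count_cons]
      rcases eq_or_ne k a with rfl | h
      · simp
      · simp [h, Ne.symm h]
    rw [List.map_congr_left h1, PySem.List.sum_map_add_int,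
      ih (fun x hx => hmem x (by simp [hx])),
      pv_sum_pick K a (fun _ => 1) hnd (hmem a (by simp))]
    simp

lemma pv_sum_mul_count (K ls : List Int) (hnd : K.Nodup) (hmem : ∀ x ∈ ls, x ∈ K) :
    (K.map (fun k => k * (ls.count k : Int))).sum = ls.sum := by
  induction ls with
  | nil => simp
  | cons a ls ih =>
    have h1 : ∀ k ∈ K, k * ((a :: ls).count k : Int)
        = k * (ls.count k : Int) + (if k = a then k else 0) := by
      intro k _
      rw [List.count_cons]
      rcases eq_or_ne k a with rfl | h
      · push_cast
        ring_nf
        simp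
      · simp [h, Ne.symm h]
    rw [List.map_congr_left h1, PySem.List.sum_map_add_int,
      ih (fun x hx => hmem x (by simp [hx])),
      pv_sum_pick K a (fun k => k) hnd (hmem a (by simp))]
    simp
    ring

lemma pv_max_eq (ls : List Int) (hne : ls ≠ []) :
    (PySem.List.max? (PySem.Set.ofList ls) (fun x => x)).getD 0
      = (PySem.List.max? ls (fun x => x)).getD 0 := by
  obtain ⟨x, hx⟩ := List.exists_mem_of_ne_nil ls hne
  cases h1 : PySem.List.max? ls (fun x => x) with
  | none => exact absurd ((PySem.List.max?_eq_none_iff ls _).mp h1) hne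
  | some m1 =>
    cases h2 : PySem.List.max? (PySem.Set.ofList ls) (fun x => x) with
    | none =>
      have := (PySem.List.max?_eq_none_iff (PySem.Set.ofList ls) (fun x => x)).mp h2
      exact absurd this (List.ne_nil_of_mem ((PySem.Set.mem_ofList ls x).mpr hx))
    | some m2 =>
      have hm1 := PySem.List.max?_mem h1
      have hm2 := PySem.List.max?_mem h2
      have le1 : m1 ≤ m2 :=
        PySem.List.max?_isMax h2 m1 ((PySem.Set.mem_ofList ls m1).mpr hm1)
      have le2 : m2 ≤ m1 :=
        PySem.List.max?_isMax h1 m2 ((PySem.Set.mem_ofList ls m2).mp hm2)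
      simp [le_antisymm le1 le2]

-- the inner dict A builds for a character is the Counter of B's run list for that character
lemma pv_getD_foldl_modify {β : Type} (l : List (Char × Int)) (g : Int → β → β) (d0 : β)
    (d : PySem.Dict Char β) (c : Char) :
    (l.foldl (fun d p => d.modify p.1 d0 (g p.2)) d).getD c d0
      = ((l.filter (fun p => p.1 == c)).map (·.2)).foldl (fun b a => g a b) (d.getD c d0) := by
  induction l generalizing d with
  | nil => rfl
  | cons p l ih =>
    simp only [List.foldl_cons, List.filter_cons]
    by_cases h : p.1 = c
    · simp only [h, beq_self_eq_true]
      rw [ih, PySem.Dict.getD_modify]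
      simp
    · have : (p.1 == c) = false := by simp [h]
      simp only [this, Bool.false_eq_true, if_false]
      rw [ih, PySem.Dict.getD_modify]
      simp [Ne.symm h]

-- every run length produced by groupby is at least 1
lemma pvRunsAux_pos (c : Char) (k : Int) (cs : List Char) (hk : 1 ≤ k) :
    ∀ p ∈ pvRunsAux c k cs, 1 ≤ p.2 := by
  induction cs generalizing c k with
  | nil => intro p hp; simp [pvRunsAux] at hp; rw [hp]; exact hk
  | cons d rest ih =>
    intro p hp
    simp only [pvRunsAux] at hp
    split at hp
    · exact ih c (k + 1) (by omega) p hp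
    · rcases List.mem_cons.mp hp with h | h
      · subst h; exact hk
      · exact ih d 1 (by omega) p h

lemma pvRuns_pos (cs : List Char) : ∀ p ∈ pvRuns cs, 1 ≤ p.2 := by
  cases cs with
  | nil => intro p hp; simp [pvRuns] at hp
  | cons c rest => exact pvRunsAux_pos c 1 rest (by omega)

-- per-character agreement: A's body on Counter(ls) equals B's body on ls
lemma pv_char (ls : List Int) (ans : Int) (hne : ls ≠ []) (hpos : ∀ r ∈ ls, 1 ≤ r) :
    (let cbl := PySem.Dict.counter ls
     let t := cbl.values.sum
     let sv := (cbl.items.map (fun p => p.1 * p.2)).sum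
     let m := (PySem.List.max? cbl.keys (fun x => x)).getD 0
     ((PySem.List.pyRange 1 (m + 1) 1).foldl
       (fun st l =>
         (st.1 - PySem.Int.floordiv (st.2.1 * (st.2.1 - 1)) 2,
          st.2.1 - st.2.2,
          st.2.2 - cbl.getD l 0))
       (ans, sv, t)).1)
    = (PySem.List.pyRange 0 ((PySem.List.max? ls (fun x => x)).getD 0) 1).foldl
        (fun ans d =>
          let sd := (ls.map (fun r => max (r - d) 0)).sum
          ans - PySem.Int.floordiv (sd * (sd - 1)) 2)
        ans := by
  have hnd : (PySem.Set.ofList ls).Nodup := PySem.Set.nodup_ofList ls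
  have hmem : ∀ x ∈ ls, x ∈ PySem.Set.ofList ls := fun x hx => (PySem.Set.mem_ofList ls x).mpr hx
  have ht : (PySem.Dict.counter ls).values.sum = (ls.length : Int) := by
    simp only [PySem.Dict.values, PySem.Dict.items_counter, List.map_map]
    simpa using pv_sum_count _ ls hnd hmem
  have hsv : ((PySem.Dict.counter ls).items.map (fun p => p.1 * p.2)).sum = ls.sum := by
    simp only [PySem.Dict.items_counter, List.map_map]
    simpa using pv_sum_mul_count _ ls hnd hmem
  simp only [ht, hsv, PySem.Dict.keys_counter, pv_max_eq ls hne]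
  rw [← pvS_zero ls hpos, ← pvT_zero ls hpos]
  simpa using pv_core ls ((PySem.List.max? ls (fun x => x)).getD 0) 0 ans

-- the whole-program correspondence, on the shared run list
lemma pv_main (runs : List (Char × Int)) (hpos : ∀ p ∈ runs, 1 ≤ p.2) (base : Int) :
    ((runs.foldl
        (fun d p => d.modify p.1 PySem.Dict.empty (fun inner => inner.modify p.2 0 (· + 1)))
        PySem.Dict.empty).values.foldl
      (fun answer cbl =>
        let t := cbl.values.sum
        let sv := (cbl.items.map (fun p => p.1 * p.2)).sum
        let m := (PySem.List.max? cbl.keys (fun x => x)).getD 0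
        ((PySem.List.pyRange 1 (m + 1) 1).foldl
          (fun st l =>
            (st.1 - PySem.Int.floordiv (st.2.1 * (st.2.1 - 1)) 2,
             st.2.1 - st.2.2,
             st.2.2 - cbl.getD l 0))
          (answer, sv, t)).1)
      base)
    = (runs.foldl (fun d p => d.modify p.1 [] (· ++ [p.2])) PySem.Dict.empty).values.foldl
        (fun answer rs =>
          (PySem.List.pyRange 0 ((PySem.List.max? rs (fun x => x)).getD 0) 1).foldl
            (fun ans d =>
              let sd := (rs.map (fun r => max (r - d) 0)).sum
              ans - PySem.Int.floordiv (sd * (sd - 1)) 2)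
            answer)
        base := by
  have hndA : ((runs.foldl
      (fun d p => d.modify p.1 (PySem.Dict.empty : PySem.Dict Int Int) (fun inner => inner.modify p.2 0 (· + 1)))
      PySem.Dict.empty)).keys.Nodup :=
    PySem.Dict.nodup_keys_foldl_modify_key runs (fun p => p.1) (PySem.Dict.empty : PySem.Dict Int Int)
      (fun _ p => fun inner => inner.modify p.2 0 (· + 1)) PySem.Dict.empty
      PySem.Dict.nodup_keys_empty
  have hndB : ((runs.foldl (fun d p => d.modify p.1 [] (· ++ [p.2])) PySem.Dict.empty)).keys.Nodup :=
    PySem.Dict.nodup_keys_foldl_modify_key runs (fun p => p.1) []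
      (fun _ p => (· ++ [p.2])) PySem.Dict.empty PySem.Dict.nodup_keys_empty
  have hKA : ((runs.foldl
      (fun d p => d.modify p.1 (PySem.Dict.empty : PySem.Dict Int Int) (fun inner => inner.modify p.2 0 (· + 1)))
      PySem.Dict.empty)).keys = PySem.Set.ofList (runs.map (fun p => p.1)) :=
    PySem.Dict.keys_foldl_modify_key runs (fun p => p.1) (PySem.Dict.empty : PySem.Dict Int Int)
      (fun _ p => fun inner => inner.modify p.2 0 (· + 1)) PySem.Dict.empty
  have hKB : ((runs.foldl (fun d p => d.modify p.1 [] (· ++ [p.2])) PySem.Dict.empty)).keys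
      = PySem.Set.ofList (runs.map (fun p => p.1)) :=
    PySem.Dict.keys_foldl_modify_key runs (fun p => p.1) []
      (fun _ p => (· ++ [p.2])) PySem.Dict.empty
  rw [PySem.Dict.values_eq_map_keys _ hndA (PySem.Dict.empty : PySem.Dict Int Int), hKA, List.foldl_map,
    PySem.Dict.values_eq_map_keys _ hndB ([] : List Int), hKB, List.foldl_map]
  apply PySem.List.foldl_congr_mem
  intro acc c hc
  have hcm : c ∈ runs.map (fun p => p.1) := (PySem.Set.mem_ofList _ c).mp hc
  obtain ⟨p, hp, hpc⟩ := List.mem_map.mp hcm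
  have hgA : ((runs.foldl
      (fun d p => d.modify p.1 (PySem.Dict.empty : PySem.Dict Int Int) (fun inner => inner.modify p.2 0 (· + 1)))
      PySem.Dict.empty)).getD c (PySem.Dict.empty : PySem.Dict Int Int)
      = PySem.Dict.counter ((runs.filter (fun p => p.1 == c)).map (fun p => p.2)) := by
    have h := pv_getD_foldl_modify runs
      (fun len inner => inner.modify len 0 (· + 1)) (PySem.Dict.empty : PySem.Dict Int Int) PySem.Dict.empty c
    rw [PySem.Dict.getD_empty] at h
    exact h.trans (PySem.Dict.counter_eq_foldl _).symm
  have hgB : ((runs.foldl (fun d p => d.modify p.1 [] (· ++ [p.2])) PySem.Dict.empty)).getD c []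
      = (runs.filter (fun p => p.1 == c)).map (fun p => p.2) := by
    have h := PySem.Dict.getD_foldl_modify_append runs PySem.Dict.empty c
    rw [PySem.Dict.getD_empty] at h
    simpa using h
  rw [hgA, hgB]
  have hne : (runs.filter (fun p => p.1 == c)).map (fun p => p.2) ≠ [] := by
    apply List.ne_nil_of_mem (a := p.2)
    exact List.mem_map_of_mem (List.mem_filter.mpr ⟨hp, by simp [hpc]⟩)
  have hpos' : ∀ r ∈ (runs.filter (fun p => p.1 == c)).map (fun p => p.2), 1 ≤ r := by
    intro r hr
    obtain ⟨q, hq, rfl⟩ := List.mem_map.mp hr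
    exact hpos q (List.mem_filter.mp hq).1
  exact pv_char _ acc hne hpos'

-- ===== VERDICT (by name: the statement is the Claim_ definition above) =====
theorem solution_spec : Claim_equal_solution := by
  intro s _
  unfold Spec_solution solution solution_alt
  exact pv_main (pvRuns s.toList) (pvRuns_pos s.toList) _
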